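-- pv_equiv track=rewrite | github.com/Aguado4/UVa-problemas | 11335 Discrete Pursuit.py | eje
-- ===== SOURCE A (Python) =====
-- def eje(a,u,v):
--     pospol = [0,1] #x,y como si hubiera pasado una unidad de tiempo
--     poslad = [a,v] #x,y se inicializa asi para que pueda entrar al ciclo
--     x,y = 0,1 #velocidad del policia en x,y para que y pueda avanzar ya que empiezan iguales
--     t,timx,timy = 0,0,1 #tiempo total,tiempo x, tiempo y en uno porque ya avanzo
--     if a != 0:#evita que entre si empiezan en la misma posicion
--         while pospol[0] < poslad[0] or pospol[1] < poslad[1]: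
--             #parte x
--             if pospol[0] < poslad[0]:
--                 timx += 1
--                 poslad[0] += u
--                 x += 1
--                 pospol[0] += x
--             #parte y
--             if pospol[1] < poslad[1]:
--                 timy += 1
--                 poslad[1] += v
--                 y += 1
--                 pospol[1] += y
--         t = max(timx,timy)
--     return t
-- ===== SOURCE B (Python) =====
-- def eje(a, u, v):
--     # Closed-form y-axis + binary search on the x-axis catch step instead of step-by-step simulation.
--     if a == 0:
--         return 0
--     ty = 2 * v - 1 if v >= 1 else 1
--     if a < 0:
--         tx = 0
--     else:
--         # least t >= 0 with t*(t+1)//2 >= a + u*t (predicate is monotone in t since a > 0)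
--         hi = 1
--         while hi * (hi + 1) // 2 < a + u * hi:
--             hi *= 2
--         lo = 0
--         while lo < hi:
--             mid = (lo + hi) // 2
--             if mid * (mid + 1) // 2 >= a + u * mid:
--                 hi = mid
--             else:
--                 lo = mid + 1
--         tx = lo
--     return max(tx, ty)
-- ===== Notes on version B (the rewrite author's own statement) =====
-- stated objective: faster
-- what changed: Replaces the unit-step pursuit simulation with a closed form for the y-axis catch step (max(1, 2v-1)) and a doubling-then-binary-search for the least x-axis step t with t(t+1)/2 >= a + u*t, exploiting that the catch predicate is monotone once a > 0.
import Mathlib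
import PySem

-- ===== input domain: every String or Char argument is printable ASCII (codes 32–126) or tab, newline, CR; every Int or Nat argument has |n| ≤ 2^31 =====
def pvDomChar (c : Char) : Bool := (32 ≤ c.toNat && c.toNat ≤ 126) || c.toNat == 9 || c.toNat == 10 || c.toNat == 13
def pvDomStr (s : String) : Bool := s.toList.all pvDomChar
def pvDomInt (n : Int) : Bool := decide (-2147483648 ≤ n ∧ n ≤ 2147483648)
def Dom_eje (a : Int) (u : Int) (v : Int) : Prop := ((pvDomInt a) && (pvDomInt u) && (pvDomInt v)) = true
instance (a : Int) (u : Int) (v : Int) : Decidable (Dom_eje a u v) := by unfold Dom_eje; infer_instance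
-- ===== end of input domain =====

-- B replaces A's step-by-step pursuit simulation by a closed form for the y-axis and a
-- doubling + binary search for the x-axis catch step (objective: faster, asymptotic).

-- ===== PORT A =====
-- A's while-loop; fuel only makes the recursion total (proved sufficient below),
-- the branch structure mirrors the Python body (x-part then y-part per iteration).
def ejeLoop (u : Int) (v : Int) : Nat → Int → Int → Int → Int → Int → Int → Int → Int → Int × Int
  | 0, _, _, _, _, _, _, timx, timy => (timx, timy)
  | Nat.succ f, px, py, lx, ly, x, y, timx, timy =>
    if px < lx ∨ py < ly then
      if px < lx then
        if py < ly then
          ejeLoop u v f (px + (x+1)) (py + (y+1)) (lx + u) (ly + v) (x+1) (y+1) (timx+1) (timy+1)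
        else
          ejeLoop u v f (px + (x+1)) py (lx + u) ly (x+1) y (timx+1) timy
      else
        if py < ly then
          ejeLoop u v f px (py + (y+1)) lx (ly + v) x (y+1) timx (timy+1)
        else (timx, timy)
    else (timx, timy)

def eje (a : Int) (u : Int) (v : Int) : Int :=
  if a ≠ 0 then
    let r := ejeLoop u v (2*a.natAbs + 2*u.natAbs + 2*v.natAbs + 4) 0 1 a v 0 1 0 1
    max r.1 r.2
  else 0

-- ===== PORT B =====
-- while hi*(hi+1)//2 < a + u*hi: hi *= 2   (fuel 128 only for totality; enough on Dom)
def ejeGrow (a : Int) (u : Int) : Nat → Int → Int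
  | 0, hi => hi
  | Nat.succ f, hi =>
    if PySem.Int.floordiv (hi*(hi+1)) 2 < a + u*hi then ejeGrow a u f (2*hi) else hi

-- while lo < hi: mid = (lo+hi)//2; if mid*(mid+1)//2 >= a+u*mid: hi = mid else lo = mid+1
def ejeSearch (a : Int) (u : Int) (lo : Int) (hi : Int) : Int :=
  if h : lo < hi then
    let mid := PySem.Int.floordiv (lo + hi) 2
    if a + u*mid ≤ PySem.Int.floordiv (mid*(mid+1)) 2 then ejeSearch a u lo mid
    else ejeSearch a u (mid+1) hi
  else lo
termination_by (hi - lo).toNat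
decreasing_by
  · have : PySem.Int.floordiv (lo + hi) 2 < hi := by
      rw [PySem.Int.floordiv_lt_iff_lt_mul (by omega)]; omega
    omega
  · have hb := PySem.Int.floordiv_two_mid_bounds (lo := lo) (hi := hi) (le_of_lt h)
    omega

def eje_alt (a : Int) (u : Int) (v : Int) : Int :=
  if a = 0 then 0
  else
    let ty := if 1 ≤ v then 2*v - 1 else 1
    let tx := if a < 0 then 0 else ejeSearch a u 0 (ejeGrow a u 128 1)
    max tx ty

-- ===== PRECONDITION & SPEC =====
def Spec_eje (a : Int) (u : Int) (v : Int) (out : Int) : Prop := out = eje_alt a u v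
instance (a : Int) (u : Int) (v : Int) (out : Int) : Decidable (Spec_eje a u v out) := by unfold Spec_eje; infer_instance

-- ===== CLAIM (what is proved, stated in full; the proofs are below) =====
def Claim_equal_eje : Prop := ∀ (a : Int) (u : Int) (v : Int), Dom_eje a u v → Spec_eje a u v (eje a u v)

-- ===== LEMMAS AND PROOFS =====

-- "police at step t has caught the x-target": t*(t+1)/2 ≥ a + u*t, stated without division
def PredX (a u t : Int) : Prop := 2*(a + u*t) ≤ t*(t+1)
def PredY (v t : Int) : Prop := 2*(v*t) ≤ t*(t+1)

theorem predX_iff (a u t : Int) :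
    (a + u*t ≤ PySem.Int.floordiv (t*(t+1)) 2) ↔ PredX a u t := by
  rw [PySem.Int.le_floordiv_iff_mul_le (by omega)]
  unfold PredX; constructor <;> intro h <;> omega

theorem predX_mono (a u t : Int) (ha : 0 < a) (ht : 0 ≤ t) (h : PredX a u t) :
    PredX a u (t + 1) := by
  unfold PredX at *
  rcases le_or_gt u (t + 1) with hu | hu
  · nlinarith
  · exfalso
    have h1 : (t+2) * t ≤ u * t := mul_le_mul_of_nonneg_right (by omega) ht
    nlinarith

theorem predX_mono' (a u s t : Int) (ha : 0 < a) (hs : 0 ≤ s) (hst : s ≤ t)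
    (h : PredX a u s) : PredX a u t := by
  induction t, hst using Int.le_induction with
  | base => exact h
  | succ n hn ih => exact predX_mono a u n ha (by omega) ih

theorem predX_big (a u t : Int) (ha : 0 < a) (ht : 2*a + 2*(u.natAbs : Int) ≤ t) :
    PredX a u t := by
  unfold PredX
  have hu : u ≤ (u.natAbs : Int) := by omega
  have ht0 : (0:Int) ≤ t := by omega
  have h1 : u * t ≤ (u.natAbs : Int) * t := mul_le_mul_of_nonneg_right hu ht0
  nlinarith [mul_le_mul_of_nonneg_right ht ht0]

theorem grow_spec (a u : Int) (ha : 0 < a) :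
    ∀ (f : Nat) (hi : Int), 1 ≤ hi → 2*a + 2*(u.natAbs : Int) ≤ 2^f * hi →
      1 ≤ ejeGrow a u f hi ∧ PredX a u (ejeGrow a u f hi) := by
  intro f
  induction f with
  | zero =>
    intro hi h1 hM
    simp only [pow_zero, one_mul] at hM
    exact ⟨by simpa [ejeGrow] using h1, by simpa [ejeGrow] using predX_big a u hi ha hM⟩
  | succ f ih =>
    intro hi h1 hM
    simp only [ejeGrow]
    by_cases hc : PySem.Int.floordiv (hi*(hi+1)) 2 < a + u*hi
    · simp only [hc, if_true]
      exact ih (2*hi) (by omega) (by rw [pow_succ] at hM; linarith [hM, mul_assoc ((2:Int)^f) 2 hi])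
    · simp only [hc, if_false]
      refine ⟨h1, ?_⟩
      rw [← predX_iff]; omega

theorem search_spec (a u : Int) (ha : 0 < a) :
    ∀ (n : Nat) (lo hi : Int), (hi - lo).toNat ≤ n → 0 ≤ lo → lo ≤ hi → PredX a u hi →
      (∀ t, 0 ≤ t → t < lo → ¬ PredX a u t) →
      0 ≤ ejeSearch a u lo hi ∧ PredX a u (ejeSearch a u lo hi) ∧
        (∀ t, 0 ≤ t → t < ejeSearch a u lo hi → ¬ PredX a u t) := by
  intro n
  induction n with
  | zero =>
    intro lo hi hn h0 hlh hp hbelow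
    have : lo = hi := by omega
    subst this
    rw [ejeSearch]; simp only [lt_irrefl, dif_neg, not_false_iff]
    exact ⟨h0, hp, hbelow⟩
  | succ n ih =>
    intro lo hi hn h0 hlh hp hbelow
    rw [ejeSearch]
    by_cases h : lo < hi
    · simp only [h, dif_pos]
      have hb := PySem.Int.floordiv_two_mid_bounds (lo := lo) (hi := hi) (le_of_lt h)
      have hmlt : PySem.Int.floordiv (lo + hi) 2 < hi := by
        rw [PySem.Int.floordiv_lt_iff_lt_mul (by omega)]; omega
      set mid := PySem.Int.floordiv (lo + hi) 2 with hmid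
      by_cases hpm : a + u*mid ≤ PySem.Int.floordiv (mid*(mid+1)) 2
      · simp only [hpm, if_true]
        exact ih lo mid (by omega) h0 (by omega) ((predX_iff a u mid).mp hpm) hbelow
      · simp only [hpm, if_false]
        have hnp : ¬ PredX a u mid := fun hc => hpm ((predX_iff a u mid).mpr hc)
        refine ih (mid+1) hi (by omega) (by omega) (by omega) hp ?_
        intro t ht htm
        rcases lt_or_ge t lo with h' | h'
        · exact hbelow t ht h'
        · intro hc
          exact hnp (predX_mono' a u t mid ha ht (by omega) hc)
    · simp only [h, dif_neg, not_false_iff]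
      have : lo = hi := by omega
      subst this
      exact ⟨h0, hp, hbelow⟩

-- loop invariant: from the canonical state after i x-steps and j-1 extra y-steps,
-- the loop returns exactly the first catch steps (X, Y)
theorem loop_spec (a u v : Int) :
    ∀ (f : Nat) (i j px py X Y : Int),
      2*px = i*(i+1) → 2*py = j*(j+1) →
      0 ≤ i → 1 ≤ j → i ≤ X → j ≤ Y →
      PredX a u X → PredY v Y →
      (∀ t, i ≤ t → t < X → ¬ PredX a u t) →
      (∀ t, j ≤ t → t < Y → ¬ PredY v t) →
      (X - i).toNat ≤ f → (Y - j).toNat ≤ f →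
      ejeLoop u v f px py (a + u*i) (v*j) i j i j = (X, Y) := by
  intro f
  induction f with
  | zero =>
    intro i j px py X Y hpx hpy hi0 hj1 hiX hjY hPX hPY hIX hIY hfx hfy
    have hX : X = i := by omega
    have hY : Y = j := by omega
    subst hX; subst hY
    rfl
  | succ f ih =>
    intro i j px py X Y hpx hpy hi0 hj1 hiX hjY hPX hPY hIX hIY hfx hfy
    have hcx : (px < a + u*i) ↔ ¬ PredX a u i := by unfold PredX; omega
    have hcy : (py < v*j) ↔ ¬ PredY v j := by unfold PredY; omega
    by_cases hx : px < a + u*i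
    · have hni : ¬ PredX a u i := hcx.mp hx
      have hiX' : i < X := by
        have : i ≠ X := fun he => hni (he ▸ hPX)
        omega
      by_cases hy : py < v*j
      · -- both axes step
        have hnj : ¬ PredY v j := hcy.mp hy
        have hjY' : j < Y := by
          have : j ≠ Y := fun he => hnj (he ▸ hPY)
          omega
        simp only [ejeLoop, hx, hy, or_true, if_pos]
        have h1 : a + u*i + u = a + u*(i+1) := by ring
        have h2 : v*j + v = v*(j+1) := by ring
        rw [h1, h2]
        exact ih (i+1) (j+1) (px+(i+1)) (py+(j+1)) X Y (by ring_nf; ring_nf at hpx; omega)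
          (by ring_nf; ring_nf at hpy; omega)
          (by omega) (by omega) (by omega) (by omega) hPX hPY
          (fun t ht => hIX t (by omega)) (fun t ht => hIY t (by omega))
          (by omega) (by omega)
      · -- only x steps
        have hPj : PredY v j := of_not_not (fun hn => hy (hcy.mpr hn))
        have hjY' : j = Y := by
          have : ¬ j < Y := fun h => hIY j le_rfl h hPj
          omega
        simp only [ejeLoop, hx, hy, true_or, if_pos]
        have h1 : a + u*i + u = a + u*(i+1) := by ring
        rw [h1]
        exact ih (i+1) j (px+(i+1)) py X Y (by ring_nf; ring_nf at hpx; omega) hpy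
          (by omega) hj1 (by omega) hjY hPX hPY
          (fun t ht => hIX t (by omega)) hIY (by omega) (by omega)
    · -- x frozen
      have hPi : PredX a u i := of_not_not (fun hn => hx (hcx.mpr hn))
      have hiX' : i = X := by
        have : ¬ i < X := fun h => hIX i le_rfl h hPi
        omega
      by_cases hy : py < v*j
      · have hnj : ¬ PredY v j := hcy.mp hy
        have hjY' : j < Y := by
          have : j ≠ Y := fun he => hnj (he ▸ hPY)
          omega
        simp only [ejeLoop, hx, hy, or_true, if_pos, if_neg, not_false_iff]
        have h2 : v*j + v = v*(j+1) := by ring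
        rw [h2]
        exact ih i (j+1) px (py+(j+1)) X Y hpx (by ring_nf; ring_nf at hpy; omega)
          hi0 (by omega) hiX (by omega) hPX hPY
          hIX (fun t ht => hIY t (by omega)) (by omega) (by omega)
      · have hPj : PredY v j := of_not_not (fun hn => hy (hcy.mpr hn))
        have hjY' : j = Y := by
          have : ¬ j < Y := fun h => hIY j le_rfl h hPj
          omega
        simp only [ejeLoop, hx, hy, or_self, if_neg, not_false_iff]
        simp [hiX', hjY']

-- the y-axis catch step in closed form
theorem yTarget (v : Int) :
    1 ≤ (if 1 ≤ v then 2*v - 1 else 1) ∧ PredY v (if 1 ≤ v then 2*v - 1 else 1) ∧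
      (∀ t, 1 ≤ t → t < (if 1 ≤ v then 2*v - 1 else 1) → ¬ PredY v t) := by
  by_cases hv : 1 ≤ v
  · simp only [hv, if_true]
    refine ⟨by omega, by unfold PredY; ring_nf; omega, ?_⟩
    intro t ht htv
    unfold PredY
    have h1 : t*(t+1) < t*(2*v) := by
      apply mul_lt_mul_of_pos_left (by omega) (by omega)
    intro hc
    nlinarith
  · simp only [hv, if_false]
    refine ⟨le_rfl, by unfold PredY; omega, ?_⟩
    intro t ht htv; omega

theorem eje_eq (a u v : Int) (hDom : Dom_eje a u v) : eje a u v = eje_alt a u v := by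
  have hbound : a.natAbs ≤ 2147483648 ∧ u.natAbs ≤ 2147483648 ∧ v.natAbs ≤ 2147483648 := by
    simp only [Dom_eje, pvDomInt, Bool.and_eq_true, decide_eq_true_eq] at hDom
    omega
  by_cases ha0 : a = 0
  · subst ha0; simp [eje, eje_alt]
  · have hY := yTarget v
    set Y : Int := if 1 ≤ v then 2*v - 1 else 1 with hYdef
    have hYb : Y ≤ 2*(v.natAbs : Int) + 1 := by
      rw [hYdef]; split <;> omega
    rcases lt_or_gt_of_ne ha0 with hneg | hpos
    · -- a < 0 : x-axis never active, X = 0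
      have hmain := loop_spec a u v (2*a.natAbs + 2*u.natAbs + 2*v.natAbs + 4) 0 1 0 1 0 Y
        (by ring) (by ring) le_rfl le_rfl le_rfl hY.1
        (by unfold PredX; omega) hY.2.1
        (by intro t ht htx; omega) hY.2.2
        (by omega) (by omega)
      simp only [mul_zero, add_zero, mul_one] at hmain
      have eA : eje a u v = max (0:Int) Y := by
        simp only [eje]
        rw [if_pos ha0, hmain]
      have eB : eje_alt a u v = max (0:Int) Y := by
        simp only [eje_alt]
        rw [if_neg ha0, if_pos hneg, ← hYdef]
      rw [eA, eB]
    · -- a > 0 : X from doubling + binary search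
      have hg := grow_spec a u hpos 128 1 le_rfl (by
        have h128 : (2:Int)^128 * 1 = 340282366920938463463374607431768211456 := by norm_num
        rw [h128]; omega)
      have hs := search_spec a u hpos (ejeGrow a u 128 1 - 0).toNat 0 (ejeGrow a u 128 1)
        le_rfl le_rfl (by omega) hg.2 (by intro t ht htl; omega)
      set X : Int := ejeSearch a u 0 (ejeGrow a u 128 1) with hXdef
      have hXb : X ≤ 2*a + 2*(u.natAbs : Int) := by
        by_contra hc
        exact hs.2.2 (2*a + 2*(u.natAbs:Int)) (by omega) (by omega)
          (predX_big a u _ hpos le_rfl)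
      have hmain := loop_spec a u v (2*a.natAbs + 2*u.natAbs + 2*v.natAbs + 4) 0 1 0 1 X Y
        (by ring) (by ring) le_rfl le_rfl hs.1 hY.1
        hs.2.1 hY.2.1
        (by intro t ht htx; exact hs.2.2 t ht htx) hY.2.2
        (by omega) (by omega)
      simp only [mul_zero, add_zero, mul_one] at hmain
      have eA : eje a u v = max X Y := by
        simp only [eje]
        rw [if_pos ha0, hmain]
      have eB : eje_alt a u v = max X Y := by
        simp only [eje_alt]
        rw [if_neg ha0, if_neg (show ¬ a < 0 by omega), ← hXdef, ← hYdef]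
      rw [eA, eB]

-- ===== VERDICT (by name: the statement is the Claim_ definition above) =====
theorem eje_spec : Claim_equal_eje := by
  intro a u v hDom
  unfold Spec_eje
  exact eje_eq a u v hDom
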